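-- pv_equiv track=rewrite | github.com/jordipuig37/ap2-codis-2022-2023 | 2023-03-09/benzinera_biel.py | min_autonomia_necessaria
-- ===== SOURCE A (Python) =====
-- def es_valid(auton: int, atur: int, distancies: list[int]) -> bool:
--     """
--     Donades una llista de distàncies entre ciutats, un nombre d'aturades i
--     l'autonomia desitjada retorna la possibilitat de recórrer tota la carretera.
--     """
--
--     acumulat = 0
--     for tram in distancies:
--         if tram > auton:
--             return False
--
--         if acumulat + tram > auton:
--             atur -= 1
--             if atur < 0:
--                 return False
--             acumulat = tram
--         else:
--             acumulat += tram
--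
--     return True
--
-- def min_autonomia_necessaria(atur: int, distancies: list[int]) -> int:
--     """
--     Donades una llista de distàncies entre ciutats i un nombre d'aturades,
--     retorna l'autonomia necessària per recórrer tota la carretera.
--     """
--
--     left, right = -1, sum(distancies)
--     mid = (left + right) // 2
--     while left + 1 < right:
--         mid = (left + right) // 2
--
--         if es_valid(mid, atur, distancies):
--             right = mid
--         else:
--             left = mid
--
--     return left + 1
-- ===== SOURCE B (Python) =====
-- def min_autonomia_necessaria(atur: int, distancies: list[int]) -> int:
--     """Same result as A: recursive interval-halving over the same probe
--     points, but with the validity test decomposed into an element bound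
--     plus a stop COUNT compared against the budget (instead of A's
--     early-returning budget-decrementing scan)."""
--
--     def stops(a: int) -> int:
--         # number of refuelling stops the greedy plan needs with autonomy a
--         cnt, acum = 0, 0
--         for tram in distancies:
--             if acum + tram > a:
--                 cnt, acum = cnt + 1, tram
--             else:
--                 acum = acum + tram
--         return cnt
--
--     def feasible(a: int) -> bool:
--         return all(tram <= a for tram in distancies) and stops(a) <= max(atur, 0)
--
--     def search(lo: int, width: int) -> int:
--         # invariant: the answer is lo + something in [1, width] (interval (lo, lo+width])
--         if width <= 1:
--             return lo + 1
--         half = width // 2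
--         mid = lo + half
--         if feasible(mid):
--             return search(lo, half)
--         return search(mid, width - half)
--
--     return search(-1, sum(distancies) + 1)
-- ===== Notes on version B (the rewrite author's own statement) =====
-- stated objective: alternative
-- what changed: B keeps A's exact interval-halving probe sequence (the greedy validity predicate is not monotone for negative distances, so the probe order fixes the value) but restructures both halves: a recursive (lo, width) halving search replaces the while-loop over (left, right), and the validity test becomes an element bound plus a single-fold stop COUNT compared to max(atur,0) instead of A's early-returning budget-decrementing scan.
import Mathlib
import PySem

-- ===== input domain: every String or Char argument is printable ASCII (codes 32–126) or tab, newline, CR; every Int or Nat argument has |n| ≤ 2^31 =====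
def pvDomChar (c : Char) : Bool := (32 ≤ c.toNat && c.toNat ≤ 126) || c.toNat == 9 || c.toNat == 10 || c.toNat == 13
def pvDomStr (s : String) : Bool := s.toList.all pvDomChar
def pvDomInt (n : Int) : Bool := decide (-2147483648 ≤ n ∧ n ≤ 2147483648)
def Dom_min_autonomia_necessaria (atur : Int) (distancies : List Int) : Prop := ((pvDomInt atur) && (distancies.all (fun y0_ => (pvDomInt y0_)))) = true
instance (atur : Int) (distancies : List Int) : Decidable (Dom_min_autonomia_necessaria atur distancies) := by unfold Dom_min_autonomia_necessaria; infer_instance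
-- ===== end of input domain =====

-- B keeps A's probe sequence (the validity predicate is not monotone for negative
-- distances, so the probe order determines the value) but restructures everything
-- around it: recursive width-halving search and a stop-counting feasibility test
-- instead of A's while-loop with an early-returning budget-decrementing scan.

-- ===== PORT A =====
-- es_valid's for-loop with early returns, as structural recursion on the list
def pvEsLoop (auton atur acum : Int) : List Int → Bool
  | [] => true
  | tram :: rest =>
    if tram > auton then false
    else if acum + tram > auton then
      if atur - 1 < 0 then false else pvEsLoop auton (atur - 1) tram rest
    else pvEsLoop auton atur (acum + tram) rest

def es_valid (auton atur : Int) (distancies : List Int) : Bool :=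
  pvEsLoop auton atur 0 distancies

-- A's while-loop over (left, right); each pass shrinks right - left by at least
-- one, so (right - left).toNat passes of fuel make the same loop structural
def pvBsLoop (atur : Int) (d : List Int) : Nat → Int → Int → Int
  | 0, left, _ => left + 1
  | fuel + 1, left, right =>
    if left + 1 < right then
      let mid := PySem.Int.floordiv (left + right) 2
      if es_valid mid atur d then pvBsLoop atur d fuel left mid
      else pvBsLoop atur d fuel mid right
    else left + 1

def min_autonomia_necessaria (atur : Int) (distancies : List Int) : Int :=
  pvBsLoop atur distancies (distancies.sum - (-1)).toNat (-1) distancies.sum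

-- ===== PORT B =====
-- Source B's stops(a): a single fold over the list carrying (count, accumulated)
def pvStep (a : Int) (st : Int × Int) (tram : Int) : Int × Int :=
  if st.2 + tram > a then (st.1 + 1, tram) else (st.1, st.2 + tram)

def pvStops (a : Int) (distancies : List Int) : Int :=
  (distancies.foldl (pvStep a) (0, 0)).1

def pvFeasible (atur a : Int) (distancies : List Int) : Bool :=
  distancies.all (fun tram => tram ≤ a) && pvStops a distancies ≤ max atur 0

-- Source B's search(lo, width): recursive halving on the interval (lo, lo + width];
-- width shrinks every call, so width.toNat recursion steps of fuel suffice
def pvSearch (atur : Int) (d : List Int) : Nat → Int → Int → Int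
  | 0, lo, _ => lo + 1
  | fuel + 1, lo, width =>
    if width ≤ 1 then lo + 1
    else
      let half := PySem.Int.floordiv width 2
      if pvFeasible atur (lo + half) d then pvSearch atur d fuel lo half
      else pvSearch atur d fuel (lo + half) (width - half)

def min_autonomia_necessaria_alt (atur : Int) (distancies : List Int) : Int :=
  pvSearch atur distancies (distancies.sum + 1).toNat (-1) (distancies.sum + 1)

-- ===== PRECONDITION & SPEC =====
def Spec_min_autonomia_necessaria (atur : Int) (distancies : List Int) (out : Int) : Prop := out = min_autonomia_necessaria_alt atur distancies
instance (atur : Int) (distancies : List Int) (out : Int) : Decidable (Spec_min_autonomia_necessaria atur distancies out) := by unfold Spec_min_autonomia_necessaria; infer_instance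

-- ===== CLAIM (what is proved, stated in full; the proofs are below) =====
def Claim_equal_min_autonomia_necessaria : Prop := ∀ (atur : Int) (distancies : List Int), Dom_min_autonomia_necessaria atur distancies → Spec_min_autonomia_necessaria atur distancies (min_autonomia_necessaria atur distancies)

-- ===== LEMMAS AND PROOFS =====

-- the stop count is shift-invariant in its counter component
theorem pvStops_shift (a : Int) (d : List Int) (c ac : Int) :
    (d.foldl (pvStep a) (c, ac)).1 = c + (d.foldl (pvStep a) (0, ac)).1 := by
  induction d generalizing c ac with
  | nil => simp
  | cons t rest ih =>
    simp only [List.foldl_cons, pvStep, zero_add]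
    by_cases h : ac + t > a
    · simp only [if_pos h]
      rw [ih (c + 1) t, ih 1 t]; ring
    · simp only [if_neg h]
      exact ih c (ac + t)

theorem pvStops_nonneg (a : Int) (d : List Int) (ac : Int) :
    0 ≤ (d.foldl (pvStep a) (0, ac)).1 := by
  induction d generalizing ac with
  | nil => simp
  | cons t rest ih =>
    simp only [List.foldl_cons, pvStep, zero_add]
    by_cases h : ac + t > a
    · simp only [if_pos h]
      rw [pvStops_shift a rest 1 t]
      have := ih t
      omega
    · simp only [if_neg h]
      exact ih (ac + t)

-- A's early-exit budget scan equals B's element bound + stop count test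
theorem esLoop_eq_feasible (a : Int) (d : List Int) (atur ac : Int) :
    pvEsLoop a atur ac d =
      (d.all (fun tram => tram ≤ a) && decide ((d.foldl (pvStep a) (0, ac)).1 ≤ max atur 0)) := by
  induction d generalizing atur ac with
  | nil => simp [pvEsLoop]
  | cons t rest ih =>
    simp only [pvEsLoop, List.all_cons, List.foldl_cons, pvStep]
    by_cases h1 : t > a
    · simp [h1, show ¬ t ≤ a by omega]
    · have ht : t ≤ a := by omega
      have hdt : decide (t ≤ a) = true := by simp [ht]
      simp only [if_neg h1, hdt, Bool.true_and, zero_add]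
      by_cases h2 : ac + t > a
      · simp only [if_pos h2]
        rw [pvStops_shift a rest 1 t]
        by_cases h3 : atur - 1 < 0
        · have := pvStops_nonneg a rest t
          simp only [if_pos h3]
          have : ¬ (1 + (rest.foldl (pvStep a) (0, t)).1 ≤ max atur 0) := by omega
          simp [this]
        · simp only [if_neg h3]
          rw [ih (atur - 1) t]
          have hm : max (atur - 1) 0 = atur - 1 := by omega
          have hm2 : max atur 0 = atur := by omega
          rw [hm, hm2]
          congr 1
          simp only [decide_eq_decide]
          omega
      · simp only [if_neg h2]
        exact ih atur (ac + t)

theorem es_valid_eq_pvFeasible (atur a : Int) (d : List Int) :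
    es_valid a atur d = pvFeasible atur a d := by
  simp [es_valid, pvFeasible, pvStops, esLoop_eq_feasible]

-- with enough fuel, the while-loop over (left, right) equals the recursion
-- over (lo, width)
theorem bsLoop_eq_search (atur : Int) (d : List Int) (fuel : Nat) (l r : Int)
    (hfuel : r - l ≤ (fuel : Int) + 1) :
    pvBsLoop atur d fuel l r = pvSearch atur d fuel l (r - l) := by
  induction fuel generalizing l r with
  | zero => rfl
  | succ fuel ih =>
    rw [pvBsLoop, pvSearch]
    by_cases h : l + 1 < r
    · have hw : ¬ (r - l ≤ 1) := by omega
      simp only [if_pos h, if_neg hw]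
      have hdv := PySem.Int.floordiv_eq_ediv_of_pos (a := l + r) (by omega : (0:Int) < 2)
      have hdv2 := PySem.Int.floordiv_eq_ediv_of_pos (a := r - l) (by omega : (0:Int) < 2)
      have hmid : PySem.Int.floordiv (l + r) 2 = l + PySem.Int.floordiv (r - l) 2 := by
        rw [hdv, hdv2]; omega
      rw [es_valid_eq_pvFeasible, hmid]
      by_cases hf : pvFeasible atur (l + PySem.Int.floordiv (r - l) 2) d
      · simp only [if_pos hf]
        rw [ih l (l + PySem.Int.floordiv (r - l) 2) (by rw [hdv2] at *; omega)]
        congr 1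
        omega
      · simp only [if_neg hf]
        rw [ih (l + PySem.Int.floordiv (r - l) 2) r (by rw [hdv2] at *; omega)]
        congr 1
        omega
    · have hw : r - l ≤ 1 := by omega
      rw [if_neg h, if_pos hw]

-- ===== VERDICT (by name: the statement is the Claim_ definition above) =====
theorem min_autonomia_necessaria_spec : Claim_equal_min_autonomia_necessaria := by
  intro atur distancies _
  unfold Spec_min_autonomia_necessaria min_autonomia_necessaria min_autonomia_necessaria_alt
  rw [bsLoop_eq_search atur distancies _ (-1) distancies.sum (by omega)]
  have h1 : distancies.sum - (-1) = distancies.sum + 1 := by ring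
  rw [h1]
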